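-- pv_equiv track=rewrite | github.com/SprintGhost/LeetCode | 205.同构字符串.py | eigenValues
-- ===== SOURCE A (Python) =====
-- def eigenValues(x):#
--     L, p, k = {}, 0, ''
--     for i in x:
--         if i not in L:
--             p += 1
--             k, L[i] = k+str(p), str(p)
--         else:
--             k += L[i]
--     return k
-- ===== SOURCE B (Python) =====
-- def eigenValues(x):
--     seen = {}
--     for c in x:
--         seen.setdefault(c, str(len(seen) + 1))
--     return ''.join(seen[c] for c in x)
-- ===== Notes on version B (the rewrite author's own statement) =====
-- stated objective: simpler
-- what changed: A's single fused loop interleaving counter bumps, dict writes and string concatenation is split into a table-building pass (setdefault with len(seen)+1) followed by a separate join-based rendering pass.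
import Mathlib
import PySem

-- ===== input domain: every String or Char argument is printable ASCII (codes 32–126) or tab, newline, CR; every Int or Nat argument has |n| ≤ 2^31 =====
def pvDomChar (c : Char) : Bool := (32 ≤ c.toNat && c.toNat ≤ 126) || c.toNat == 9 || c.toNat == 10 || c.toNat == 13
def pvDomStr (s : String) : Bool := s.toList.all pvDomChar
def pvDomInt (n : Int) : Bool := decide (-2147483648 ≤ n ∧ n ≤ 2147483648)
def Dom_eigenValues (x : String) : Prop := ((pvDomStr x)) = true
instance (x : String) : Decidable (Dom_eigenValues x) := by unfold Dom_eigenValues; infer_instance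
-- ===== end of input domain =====

-- B replaces A's single fused loop (counter + dict write + string concatenation interleaved)
-- by a table-building pass followed by a separate join-based rendering pass (objective: simpler).

-- ===== PORT A =====
-- loop body of A: state (L, p, k); 'if i not in L' then assign str(p+1), else append L[i]
def eigStepA (s : PySem.Dict Char (List Char) × Int × List Char) (i : Char) :
    PySem.Dict Char (List Char) × Int × List Char :=
  if s.1.contains i = false then
    (s.1.insert i (PySem.Int.toChars (s.2.1 + 1)), s.2.1 + 1,
     s.2.2 ++ PySem.Int.toChars (s.2.1 + 1))
  else
    (s.1, s.2.1, s.2.2 ++ s.1.getD i [])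

def eigenValues (x : String) : String :=
  String.ofList ((x.toList.foldl eigStepA (PySem.Dict.empty, 0, [])).2.2)

-- ===== PORT B =====
-- first pass of B: seen.setdefault(c, str(len(seen) + 1))
def eigStepB (d : PySem.Dict Char (List Char)) (c : Char) : PySem.Dict Char (List Char) :=
  d.setdefault c (PySem.Int.toChars ((d.size : Int) + 1))

def eigenValues_alt (x : String) : String :=
  let seen := x.toList.foldl eigStepB PySem.Dict.empty
  String.ofList (PySem.Chars.join [] (x.toList.map (fun c => seen.getD c [])))

-- ===== PRECONDITION & SPEC =====
def Spec_eigenValues (x : String) (out : String) : Prop := out = eigenValues_alt x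
instance (x : String) (out : String) : Decidable (Spec_eigenValues x out) := by unfold Spec_eigenValues; infer_instance

-- ===== CLAIM (what is proved, stated in full; the proofs are below) =====
def Claim_equal_eigenValues : Prop := ∀ (x : String), Dom_eigenValues x → Spec_eigenValues x (eigenValues x)

-- ===== LEMMAS AND PROOFS =====

-- B's build pass never changes the binding of a key that is already present.
lemma eig_build_stable (cs : List Char) (d : PySem.Dict Char (List Char)) (c : Char)
    (h : d.contains c = true) : (cs.foldl eigStepB d).get? c = d.get? c := by
  induction cs generalizing d with
  | nil => rfl
  | cons a t ih =>
    simp only [List.foldl_cons, eigStepB]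
    by_cases hac : d.contains a = true
    · rw [PySem.Dict.setdefault_of_contains _ _ hac]; exact ih d h
    · rw [PySem.Dict.setdefault_of_not_contains _ _ (by simpa using hac)]
      have hne : c ≠ a := fun e => by subst e; simp [h] at hac
      rw [ih _ (by rw [PySem.Dict.contains_insert]; simp [h])]
      exact PySem.Dict.get?_insert_of_ne _ _ hne

-- Invariant: A's fused loop produces exactly B's rendering of the remaining characters
-- under B's finished table, provided A's counter equals the table size.
lemma eig_loop_eq (cs : List Char) (d : PySem.Dict Char (List Char)) (p : Int) (k : List Char)
    (hp : p = (d.size : Int)) :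
    (cs.foldl eigStepA (d, p, k)).2.2 =
      k ++ (cs.map (fun c => (cs.foldl eigStepB d).getD c [])).flatten := by
  induction cs generalizing d p k with
  | nil => simp
  | cons c t ih =>
    simp only [List.foldl_cons, List.map_cons, List.flatten_cons]
    by_cases hc : d.contains c = true
    · have hA : eigStepA (d, p, k) c = (d, p, k ++ d.getD c []) := by
        simp [eigStepA, hc]
      have hB : eigStepB d c = d := by
        simp only [eigStepB]; exact PySem.Dict.setdefault_of_contains _ _ hc
      rw [hA, hB, ih d p _ hp]
      have hst : (t.foldl eigStepB d).getD c [] = d.getD c [] := by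
        rw [PySem.Dict.getD_eq_get?_getD, PySem.Dict.getD_eq_get?_getD,
            eig_build_stable t d c hc]
      rw [hst]; simp
    · have hcf : d.contains c = false := by simpa using hc
      have hA : eigStepA (d, p, k) c =
          (d.insert c (PySem.Int.toChars (p + 1)), p + 1, k ++ PySem.Int.toChars (p + 1)) := by
        simp [eigStepA, hcf]
      have hB : eigStepB d c = d.insert c (PySem.Int.toChars ((d.size : Int) + 1)) := by
        simp only [eigStepB]; exact PySem.Dict.setdefault_of_not_contains _ _ hcf
      have hv : PySem.Int.toChars (p + 1) = PySem.Int.toChars ((d.size : Int) + 1) := by rw [hp]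
      have hsize : p + 1 = ((d.insert c (PySem.Int.toChars ((d.size : Int) + 1))).size : Int) := by
        rw [PySem.Dict.size_insert, if_neg (by simp [hcf])]
        push_cast; omega
      rw [hA, hB, hv, ih _ _ _ hsize]
      have hcontains : (d.insert c (PySem.Int.toChars ((d.size : Int) + 1))).contains c = true :=
        PySem.Dict.contains_insert_self _ _ _
      have hst : (t.foldl eigStepB (d.insert c (PySem.Int.toChars ((d.size : Int) + 1)))).getD c []
          = PySem.Int.toChars ((d.size : Int) + 1) := by
        rw [PySem.Dict.getD_eq_get?_getD, eig_build_stable _ _ _ hcontains,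
            PySem.Dict.get?_insert_self]
        rfl
      rw [hst]; simp

-- ''.join is flatten.
lemma eig_join_nil_flatten (l : List (List Char)) : PySem.Chars.join [] l = l.flatten := by
  induction l with
  | nil => simp [PySem.Chars.join_nil]
  | cons h t ih =>
    cases t with
    | nil => simp [PySem.Chars.join_singleton]
    | cons h2 t2 => rw [PySem.Chars.join_cons_cons]; simp_all

-- ===== VERDICT (by name: the statement is the Claim_ definition above) =====
theorem eigenValues_spec : Claim_equal_eigenValues := by
  intro x _
  unfold Spec_eigenValues eigenValues eigenValues_alt
  show String.ofList _ = String.ofList (PySem.Chars.join [] _)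
  rw [eig_join_nil_flatten, eig_loop_eq x.toList PySem.Dict.empty 0 [] (by simp)]
  simp
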